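-- pv_equiv track=rewrite | github.com/e-man07/slm | slm-cli/sealevel_cli/tool_parser.py | _find_naked_json_objects
-- ===== SOURCE A (Python) =====
-- def _find_naked_json_objects(text: str) -> list[tuple[int, int]]:
--     """Find balanced top-level JSON objects via brace-counting + string-state.
--
--     Handles braces inside string values (e.g. glob `{rs,md}`) so they don't
--     affect depth tracking. If an object opens but never closes (truncation),
--     emits a partial span so repair logic can attempt to close it.
--     """
--     spans: list[tuple[int, int]] = []
--     i = 0
--     n = len(text)
--     while i < n:
--         if text[i] != "{":
--             i += 1
--             continue
--         depth = 0
--         in_string = False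
--         escape = False
--         j = i
--         balanced = False
--         while j < n:
--             ch = text[j]
--             if in_string:
--                 if escape:
--                     escape = False
--                 elif ch == "\\":
--                     escape = True
--                 elif ch == '"':
--                     in_string = False
--             else:
--                 if ch == '"':
--                     in_string = True
--                 elif ch == "{":
--                     depth += 1
--                 elif ch == "}":
--                     depth -= 1
--                     if depth == 0:
--                         spans.append((i, j + 1))
--                         i = j + 1
--                         balanced = True
--                         break
--             j += 1
--         if not balanced:
--             spans.append((i, n))
--             break
--     return spans
-- ===== SOURCE B (Python) =====
-- def _find_naked_json_objects(text: str) -> list[tuple[int, int]]: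
--     """Single flat scan with an explicit state machine (outside/inside an object)."""
--     spans = []
--     start = -1  # -1 means: currently outside any object
--     depth = 0
--     in_string = False
--     escape = False
--     for j, ch in enumerate(text):
--         if start < 0:
--             if ch == "{":
--                 start = j
--                 depth = 1
--                 in_string = False
--                 escape = False
--         elif in_string:
--             if escape:
--                 escape = False
--             elif ch == "\\":
--                 escape = True
--             elif ch == '"':
--                 in_string = False
--         elif ch == '"':
--             in_string = True
--         elif ch == "{":
--             depth += 1
--         elif ch == "}":
--             depth -= 1
--             if depth == 0:
--                 spans.append((start, j + 1))
--                 start = -1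
--     if start >= 0:
--         spans.append((start, len(text)))
--     return spans
-- ===== Notes on version B (the rewrite author's own statement) =====
-- stated objective: simpler
-- what changed: Replaces A's nested scan (an outer while that hunts for '{' and restarts an inner brace/string-state scanner from each opening brace) with a single flat pass over the text driven by an explicit outside/inside-object state machine.
import Mathlib
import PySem

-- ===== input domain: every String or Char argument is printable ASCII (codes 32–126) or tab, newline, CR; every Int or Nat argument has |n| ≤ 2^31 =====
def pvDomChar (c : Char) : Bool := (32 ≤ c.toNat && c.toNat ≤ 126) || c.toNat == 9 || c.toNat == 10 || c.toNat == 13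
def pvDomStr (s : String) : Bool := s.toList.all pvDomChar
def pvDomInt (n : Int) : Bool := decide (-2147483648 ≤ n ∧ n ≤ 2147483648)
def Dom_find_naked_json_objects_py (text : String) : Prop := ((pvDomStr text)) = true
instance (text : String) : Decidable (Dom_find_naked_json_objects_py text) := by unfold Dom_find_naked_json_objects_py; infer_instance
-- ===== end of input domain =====

-- B replaces A's nested scan (outer '{'-finder restarting an inner brace/string scanner)
-- by one flat pass with an explicit outside/inside state; objective: simpler, same cost.

-- ===== PORT A =====
-- inner while-loop of A: scans from position j with (depth, in_string, escape);
-- returns some (j+1, rest) when depth returns to 0 ('balanced' break), none if the text ends first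
def pvInnerA (cs : List Char) (j : Int) (depth : Int) (in_string escape : Bool) :
    Option (Int × List Char) :=
  match cs with
  | [] => none
  | ch :: rest =>
    if in_string then
      if escape then pvInnerA rest (j + 1) depth true false
      else if ch = '\\' then pvInnerA rest (j + 1) depth true true
      else if ch = '"' then pvInnerA rest (j + 1) depth false false
      else pvInnerA rest (j + 1) depth true false
    else
      if ch = '"' then pvInnerA rest (j + 1) depth true false
      else if ch = '{' then pvInnerA rest (j + 1) (depth + 1) false false
      else if ch = '}' then
        if depth - 1 = 0 then some (j + 1, rest)
        else pvInnerA rest (j + 1) (depth - 1) false false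
      else pvInnerA rest (j + 1) depth false false

-- length fact needed for pvOuterA's termination (cited in decreasing_by)
theorem pvInnerA_length : ∀ (cs : List Char) (j depth : Int) (is es : Bool) (e : Int)
    (rest' : List Char), pvInnerA cs j depth is es = some (e, rest') → rest'.length < cs.length := by
  intro cs
  induction cs with
  | nil => intro j d is es e r h; simp [pvInnerA] at h
  | cons ch rest ih =>
    intro j d is es e r h
    simp only [pvInnerA] at h
    split_ifs at h with h1 h2 h3 h4 h5 h6 h7 h8 <;>
      first
        | (injection h with h'; injection h' with ha hb; subst hb; simp)
        | (exact Nat.lt_trans (ih _ _ _ _ _ _ h) (by simp))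

-- outer while-loop of A: advance over non-'{' characters; on '{' run the inner scan
def pvOuterA (cs : List Char) (i : Int) (n : Int) (acc : List (Int × Int)) : List (Int × Int) :=
  match cs with
  | [] => acc
  | ch :: rest =>
    if ch ≠ '{' then pvOuterA rest (i + 1) n acc
    else
      match h : pvInnerA (ch :: rest) i 0 false false with
      | some (e, rest') => pvOuterA rest' e n (acc ++ [(i, e)])
      | none => acc ++ [(i, n)]
termination_by cs.length
decreasing_by
  · simp
  · exact pvInnerA_length _ _ _ _ _ _ _ h

def find_naked_json_objects_py (text : String) : List (Int × Int) :=
  pvOuterA text.toList 0 (text.toList.length) []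

-- ===== PORT B =====
-- flat single pass; state = none (outside any object) | some (start, depth, in_string, escape)
def pvLoopB (cs : List Char) (j : Int) (st : Option (Int × Int × Bool × Bool))
    (acc : List (Int × Int)) : List (Int × Int) :=
  match cs with
  | [] =>
    match st with
    | none => acc
    | some (start, _, _, _) => acc ++ [(start, j)]
  | ch :: rest =>
    match st with
    | none =>
      if ch = '{' then pvLoopB rest (j + 1) (some (j, 1, false, false)) acc
      else pvLoopB rest (j + 1) none acc
    | some (start, depth, in_string, escape) =>
      if in_string then
        if escape then pvLoopB rest (j + 1) (some (start, depth, true, false)) acc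
        else if ch = '\\' then pvLoopB rest (j + 1) (some (start, depth, true, true)) acc
        else if ch = '"' then pvLoopB rest (j + 1) (some (start, depth, false, false)) acc
        else pvLoopB rest (j + 1) (some (start, depth, true, false)) acc
      else
        if ch = '"' then pvLoopB rest (j + 1) (some (start, depth, true, false)) acc
        else if ch = '{' then pvLoopB rest (j + 1) (some (start, depth + 1, false, false)) acc
        else if ch = '}' then
          if depth - 1 = 0 then pvLoopB rest (j + 1) none (acc ++ [(start, j + 1)])
          else pvLoopB rest (j + 1) (some (start, depth - 1, false, false)) acc
        else pvLoopB rest (j + 1) (some (start, depth, false, false)) acc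

def find_naked_json_objects_py_alt (text : String) : List (Int × Int) :=
  pvLoopB text.toList 0 none []

-- ===== PRECONDITION & SPEC =====
def Spec_find_naked_json_objects_py (text : String) (out : List (Int × Int)) : Prop := out = find_naked_json_objects_py_alt text
instance (text : String) (out : List (Int × Int)) : Decidable (Spec_find_naked_json_objects_py text out) := by unfold Spec_find_naked_json_objects_py; infer_instance

-- ===== CLAIM (what is proved, stated in full; the proofs are below) =====
def Claim_equal_find_naked_json_objects_py : Prop := ∀ (text : String), Dom_find_naked_json_objects_py text → Spec_find_naked_json_objects_py text (find_naked_json_objects_py text)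

-- ===== LEMMAS AND PROOFS =====

-- one step of A's inner loop on the opening brace itself
theorem pvInnerA_open (rest : List Char) (j : Int) :
    pvInnerA ('{' :: rest) j 0 false false = pvInnerA rest (j + 1) 1 false false := by
  simp [pvInnerA]

-- joint invariant: A's outer loop from the outside state, and A's inner loop (with the
-- outer continuation around it) from the inside state, agree with B's flat loop
theorem pvMain (N : Nat) : ∀ (cs : List Char), cs.length ≤ N →
    ((∀ (i n : Int) (acc : List (Int × Int)), n = i + cs.length →
        pvOuterA cs i n acc = pvLoopB cs i none acc) ∧
     (∀ (j n start depth : Int) (is es : Bool) (acc : List (Int × Int)),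
        n = j + cs.length →
        (match pvInnerA cs j depth is es with
         | some (e, rest') => pvOuterA rest' e n (acc ++ [(start, e)])
         | none => acc ++ [(start, n)]) = pvLoopB cs j (some (start, depth, is, es)) acc)) := by
  induction N with
  | zero =>
    intro cs hcs
    have hnil : cs = [] := List.eq_nil_of_length_eq_zero (Nat.le_zero.mp hcs)
    subst hnil
    refine ⟨fun i n acc hn => by simp [pvOuterA, pvLoopB],
            fun j n start d is es acc hn => ?_⟩
    simp only [pvInnerA, pvLoopB]
    simp only [List.length_nil, Nat.cast_zero, add_zero] at hn
    rw [hn]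
  | succ N ih =>
    intro cs hcs
    match cs with
    | [] =>
      refine ⟨fun i n acc hn => by simp [pvOuterA, pvLoopB],
              fun j n start d is es acc hn => ?_⟩
      simp only [pvInnerA, pvLoopB]
      simp only [List.length_nil, Nat.cast_zero, add_zero] at hn
      rw [hn]
    | ch :: rest =>
      have hr : rest.length ≤ N := by
        simp only [List.length_cons] at hcs; omega
      obtain ⟨ihO, ihI⟩ := ih rest hr
      constructor
      · intro i n acc hn
        have hn' : n = (i + 1) + (rest.length : Int) := by
          simp only [List.length_cons] at hn; push_cast at hn; omega
        by_cases hch : ch = '{'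
        · subst hch
          rw [pvOuterA, pvLoopB]
          simp only [ne_eq, not_true_eq_false, if_false, reduceIte]
          split
          · rename_i e rest' heq
            have hq : pvInnerA rest (i + 1) 1 false false = some (e, rest') :=
              (pvInnerA_open rest i).symm.trans heq
            have key := ihI (i + 1) n i 1 false false acc hn'
            rw [hq] at key
            exact key
          · rename_i heq
            have hq : pvInnerA rest (i + 1) 1 false false = none :=
              (pvInnerA_open rest i).symm.trans heq
            have key := ihI (i + 1) n i 1 false false acc hn'
            rw [hq] at key
            exact key
        · rw [pvOuterA, pvLoopB]
          simp only [ne_eq, hch, not_false_eq_true, if_true]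
          exact ihO (i + 1) n acc hn'
      · intro j n start depth is es acc hn
        have hn' : n = (j + 1) + (rest.length : Int) := by
          simp only [List.length_cons] at hn; push_cast at hn; omega
        rw [pvInnerA, pvLoopB]
        cases is with
        | true =>
          cases es with
          | true =>
            simp only [reduceIte]
            exact ihI (j + 1) n start depth true false acc hn'
          | false =>
            simp only [reduceIte, Bool.false_eq_true, if_false]
            by_cases hb : ch = '\\'
            · simp only [if_pos hb]
              exact ihI (j + 1) n start depth true true acc hn'
            · simp only [if_neg hb]
              by_cases hqq : ch = '"'
              · simp only [if_pos hqq]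
                exact ihI (j + 1) n start depth false false acc hn'
              · simp only [if_neg hqq]
                exact ihI (j + 1) n start depth true false acc hn'
        | false =>
          simp only [Bool.false_eq_true, if_false]
          by_cases hqq : ch = '"'
          · simp only [if_pos hqq]
            exact ihI (j + 1) n start depth true false acc hn'
          · simp only [if_neg hqq]
            by_cases hob : ch = '{'
            · simp only [if_pos hob]
              exact ihI (j + 1) n start (depth + 1) false false acc hn'
            · simp only [if_neg hob]
              by_cases hcb : ch = '}'
              · simp only [if_pos hcb]
                by_cases hd : depth - 1 = 0
                · simp only [if_pos hd]
                  exact ihO (j + 1) n (acc ++ [(start, j + 1)]) hn'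
                · simp only [if_neg hd]
                  exact ihI (j + 1) n start (depth - 1) false false acc hn'
              · simp only [if_neg hcb]
                exact ihI (j + 1) n start depth false false acc hn'

-- ===== VERDICT (by name: the statement is the Claim_ definition above) =====
theorem find_naked_json_objects_py_spec : Claim_equal_find_naked_json_objects_py := by
  intro text _
  unfold Spec_find_naked_json_objects_py find_naked_json_objects_py find_naked_json_objects_py_alt
  exact (pvMain text.toList.length text.toList le_rfl).1 0 (text.toList.length) [] (by omega)
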